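-- pv_equiv track=rewrite | github.com/MostlyFor/Algorithm_topic | 백준/Gold/30805. 사전 순 최대 공통 부분 수열/사전 순 최대 공통 부분 수열.py | get_max_element
-- ===== SOURCE A (Python) =====
-- def get_max_element(arr1, arr2):
--     if len(arr1) == 0 or len(arr2) == 0:
--         return 0
--
--
--     tmp1 = max(arr1)
--     tmp2 = max(arr2)
--
--     if tmp1 > tmp2:
--         arr1.remove(tmp1)
--         return get_max_element(arr1, arr2)
--
--     elif tmp1 < tmp2:
--         arr2.remove(tmp2)
--         return get_max_element(arr1, arr2)
--
--     else:
--         index1 = arr1.index(tmp1)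
--         index2 = arr2.index(tmp2)
--         del arr1[:index1 + 1]
--         del arr2[:index2 + 1]
--
--         return tmp1
-- ===== SOURCE B (Python) =====
-- def get_max_element(arr1, arr2):
--     # Return-value re-implementation: the answer is simply the largest value
--     # present in both lists (0 if none). Unlike A it does not mutate its arguments.
--     common = set(arr1) & set(arr2)
--     return max(common) if common else 0
-- ===== Notes on version B (the rewrite author's own statement) =====
-- stated objective: simpler
-- what changed: Replaces the recursive max/remove/retry loop with a single set intersection followed by one max, computing the same return value directly.
import Mathlib
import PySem

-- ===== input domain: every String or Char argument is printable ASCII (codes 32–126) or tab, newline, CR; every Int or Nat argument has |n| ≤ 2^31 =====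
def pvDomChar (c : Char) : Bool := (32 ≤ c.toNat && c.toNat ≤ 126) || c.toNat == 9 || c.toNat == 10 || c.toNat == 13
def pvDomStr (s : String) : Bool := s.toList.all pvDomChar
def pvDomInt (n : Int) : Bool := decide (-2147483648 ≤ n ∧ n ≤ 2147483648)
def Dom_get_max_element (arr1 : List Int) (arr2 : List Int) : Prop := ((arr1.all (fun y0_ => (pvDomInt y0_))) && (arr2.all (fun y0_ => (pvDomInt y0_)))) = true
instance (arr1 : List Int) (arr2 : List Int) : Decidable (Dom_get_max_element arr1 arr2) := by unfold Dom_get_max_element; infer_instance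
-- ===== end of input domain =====

-- B computes A's RETURN VALUE (the largest value common to both lists, else 0) by one set
-- intersection instead of A's recursive max/remove loop; A mutates its arguments in place,
-- B does not — the equivalence proved here is about the return value only.

-- ===== PORT A =====
-- termination helper for the port's recursion (cited by name in decreasing_by)
lemma pv_remove_max_length_lt (xs : List Int) (hxs : xs ≠ []) :
    ((PySem.List.remove? xs ((PySem.List.max? xs (fun x => x)).getD 0)).getD xs).length < xs.length := by
  obtain ⟨m, hm⟩ : ∃ m, PySem.List.max? xs (fun x => x) = some m := by
    cases h : PySem.List.max? xs (fun x => x) with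
    | none => exact absurd ((PySem.List.max?_eq_none_iff _ _).mp h) hxs
    | some m => exact ⟨m, rfl⟩
  have hmem : m ∈ xs := PySem.List.max?_mem hm
  rw [hm, Option.getD_some, PySem.List.remove?_eq_some_erase xs _ hmem, Option.getD_some]
  have := List.length_erase_of_mem hmem
  have : 0 < xs.length := List.length_pos_of_mem hmem
  omega

def get_max_element (arr1 : List Int) (arr2 : List Int) : Int :=
  if arr1.length = 0 ∨ arr2.length = 0 then 0
  else
    let tmp1 := (PySem.List.max? arr1 (fun x => x)).getD 0   -- max(arr1); nonempty here, so never the default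
    let tmp2 := (PySem.List.max? arr2 (fun x => x)).getD 0   -- max(arr2)
    if tmp1 > tmp2 then
      get_max_element ((PySem.List.remove? arr1 tmp1).getD arr1) arr2   -- arr1.remove(tmp1); tmp1 ∈ arr1, so never the default
    else if tmp1 < tmp2 then
      get_max_element arr1 ((PySem.List.remove? arr2 tmp2).getD arr2)   -- arr2.remove(tmp2)
    else
      -- Python also computes index1/index2 and dels prefixes of arr1/arr2 here: in-place
      -- mutations of the arguments that do not affect the returned value.
      tmp1
  termination_by arr1.length + arr2.length
  decreasing_by
  · have hne : ¬(arr1.length = 0 ∨ arr2.length = 0) := by assumption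
    rw [not_or] at hne
    have := pv_remove_max_length_lt arr1 (by intro he; exact hne.1 (by simp [he]))
    omega
  · have hne : ¬(arr1.length = 0 ∨ arr2.length = 0) := by assumption
    rw [not_or] at hne
    have := pv_remove_max_length_lt arr2 (by intro he; exact hne.2 (by simp [he]))
    omega

-- ===== PORT B =====
def get_max_element_alt (arr1 : List Int) (arr2 : List Int) : Int :=
  let common : PySem.Set Int := PySem.Set.inter (PySem.Set.ofList arr1) (PySem.Set.ofList arr2)
  match PySem.List.max? common (fun x => x) with   -- max(common) if common else 0
  | some m => m
  | none => 0

-- ===== PRECONDITION & SPEC =====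
def Spec_get_max_element (arr1 : List Int) (arr2 : List Int) (out : Int) : Prop := out = get_max_element_alt arr1 arr2
instance (arr1 : List Int) (arr2 : List Int) (out : Int) : Decidable (Spec_get_max_element arr1 arr2 out) := by unfold Spec_get_max_element; infer_instance

-- ===== CLAIM (what is proved, stated in full; the proofs are below) =====
def Claim_equal_get_max_element : Prop := ∀ (arr1 : List Int) (arr2 : List Int), Dom_get_max_element arr1 arr2 → Spec_get_max_element arr1 arr2 (get_max_element arr1 arr2)

-- ===== LEMMAS AND PROOFS =====

lemma alt_eq_zero_of_disjoint (a1 a2 : List Int) (h : ∀ x ∈ a1, x ∉ a2) :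
    get_max_element_alt a1 a2 = 0 := by
  unfold get_max_element_alt
  have hc : PySem.Set.inter (PySem.Set.ofList a1) (PySem.Set.ofList a2) = [] := by
    apply List.eq_nil_iff_forall_not_mem.mpr
    intro x hx
    rw [PySem.Set.mem_inter _ _ _] at hx
    exact h x ((PySem.Set.mem_ofList _ _).mp hx.1) ((PySem.Set.mem_ofList _ _).mp hx.2)
  simp [hc, PySem.List.max?]

lemma alt_eq_of_common (a1 a2 : List Int) (m : Int) (hm1 : m ∈ a1) (hm2 : m ∈ a2)
    (hmax : ∀ x, x ∈ a1 → x ∈ a2 → x ≤ m) :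
    get_max_element_alt a1 a2 = m := by
  unfold get_max_element_alt
  have hmc : m ∈ PySem.Set.inter (PySem.Set.ofList a1) (PySem.Set.ofList a2) := by
    rw [PySem.Set.mem_inter _ _ _]
    exact ⟨(PySem.Set.mem_ofList _ _).mpr hm1, (PySem.Set.mem_ofList _ _).mpr hm2⟩
  cases h : PySem.List.max? (PySem.Set.inter (PySem.Set.ofList a1) (PySem.Set.ofList a2)) (fun x => x) with
  | none =>
    rw [PySem.List.max?_eq_none_iff] at h
    simp [h] at hmc
  | some M =>
    have hMmem := PySem.List.max?_mem h
    rw [PySem.Set.mem_inter _ _ _] at hMmem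
    have hMle : M ≤ m :=
      hmax M ((PySem.Set.mem_ofList _ _).mp hMmem.1) ((PySem.Set.mem_ofList _ _).mp hMmem.2)
    have hmle : m ≤ M := PySem.List.max?_isMax h m hmc
    have hMm : M = m := le_antisymm hMle hmle
    simp [h, hMm]

lemma alt_erase_left (a1 a2 : List Int) (v : Int) (hv : v ∉ a2) :
    get_max_element_alt (a1.erase v) a2 = get_max_element_alt a1 a2 := by
  by_cases hcom : ∃ x, x ∈ a1 ∧ x ∈ a2
  · -- there is a common element; take the max of the common list
    obtain ⟨x0, hx01, hx02⟩ := hcom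
    have hx0c : x0 ∈ PySem.Set.inter (PySem.Set.ofList a1) (PySem.Set.ofList a2) := by
      rw [PySem.Set.mem_inter _ _ _]
      exact ⟨(PySem.Set.mem_ofList _ _).mpr hx01, (PySem.Set.mem_ofList _ _).mpr hx02⟩
    have hne : PySem.Set.inter (PySem.Set.ofList a1) (PySem.Set.ofList a2) ≠ [] := by
      intro h; rw [h] at hx0c; simp at hx0c
    obtain ⟨m, hm⟩ : ∃ m, PySem.List.max? (PySem.Set.inter (PySem.Set.ofList a1) (PySem.Set.ofList a2)) (fun x => x) = some m := by
      cases h : PySem.List.max? (PySem.Set.inter (PySem.Set.ofList a1) (PySem.Set.ofList a2)) (fun x => x) with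
      | none => exact absurd ((PySem.List.max?_eq_none_iff _ _).mp h) hne
      | some m => exact ⟨m, rfl⟩
    have hmmem := PySem.List.max?_mem hm
    rw [PySem.Set.mem_inter _ _ _] at hmmem
    have hm1 : m ∈ a1 := (PySem.Set.mem_ofList _ _).mp hmmem.1
    have hm2 : m ∈ a2 := (PySem.Set.mem_ofList _ _).mp hmmem.2
    have hmax : ∀ x, x ∈ a1 → x ∈ a2 → x ≤ m := by
      intro x hxa1 hxa2
      exact PySem.List.max?_isMax hm x (by
        rw [PySem.Set.mem_inter _ _ _]
        exact ⟨(PySem.Set.mem_ofList _ _).mpr hxa1, (PySem.Set.mem_ofList _ _).mpr hxa2⟩)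
    have hmv : m ≠ v := fun h => hv (h ▸ hm2)
    rw [alt_eq_of_common a1 a2 m hm1 hm2 hmax,
        alt_eq_of_common (a1.erase v) a2 m ((List.mem_erase_of_ne hmv).mpr hm1) hm2
          (fun x hx1 hx2 => hmax x (List.mem_of_mem_erase hx1) hx2)]
  · push Not at hcom
    rw [alt_eq_zero_of_disjoint a1 a2 hcom,
        alt_eq_zero_of_disjoint (a1.erase v) a2
          (fun x hx => hcom x (List.mem_of_mem_erase hx))]

lemma alt_erase_right (a1 a2 : List Int) (v : Int) (hv : v ∉ a1) :
    get_max_element_alt a1 (a2.erase v) = get_max_element_alt a1 a2 := by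
  by_cases hcom : ∃ x, x ∈ a1 ∧ x ∈ a2
  · obtain ⟨x0, hx01, hx02⟩ := hcom
    have hx0c : x0 ∈ PySem.Set.inter (PySem.Set.ofList a1) (PySem.Set.ofList a2) := by
      rw [PySem.Set.mem_inter _ _ _]
      exact ⟨(PySem.Set.mem_ofList _ _).mpr hx01, (PySem.Set.mem_ofList _ _).mpr hx02⟩
    have hne : PySem.Set.inter (PySem.Set.ofList a1) (PySem.Set.ofList a2) ≠ [] := by
      intro h; rw [h] at hx0c; simp at hx0c
    obtain ⟨m, hm⟩ : ∃ m, PySem.List.max? (PySem.Set.inter (PySem.Set.ofList a1) (PySem.Set.ofList a2)) (fun x => x) = some m := by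
      cases h : PySem.List.max? (PySem.Set.inter (PySem.Set.ofList a1) (PySem.Set.ofList a2)) (fun x => x) with
      | none => exact absurd ((PySem.List.max?_eq_none_iff _ _).mp h) hne
      | some m => exact ⟨m, rfl⟩
    have hmmem := PySem.List.max?_mem hm
    rw [PySem.Set.mem_inter _ _ _] at hmmem
    have hm1 : m ∈ a1 := (PySem.Set.mem_ofList _ _).mp hmmem.1
    have hm2 : m ∈ a2 := (PySem.Set.mem_ofList _ _).mp hmmem.2
    have hmax : ∀ x, x ∈ a1 → x ∈ a2 → x ≤ m := by
      intro x hxa1 hxa2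
      exact PySem.List.max?_isMax hm x (by
        rw [PySem.Set.mem_inter _ _ _]
        exact ⟨(PySem.Set.mem_ofList _ _).mpr hxa1, (PySem.Set.mem_ofList _ _).mpr hxa2⟩)
    have hmv : m ≠ v := fun h => hv (h ▸ hm1)
    rw [alt_eq_of_common a1 a2 m hm1 hm2 hmax,
        alt_eq_of_common a1 (a2.erase v) m hm1 ((List.mem_erase_of_ne hmv).mpr hm2)
          (fun x hx1 hx2 => hmax x hx1 (List.mem_of_mem_erase hx2))]
  · push Not at hcom
    rw [alt_eq_zero_of_disjoint a1 a2 hcom,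
        alt_eq_zero_of_disjoint a1 (a2.erase v)
          (fun x hx h2 => hcom x hx (List.mem_of_mem_erase h2))]

lemma main_eq : ∀ (n : Nat) (a1 a2 : List Int), a1.length + a2.length = n →
    get_max_element a1 a2 = get_max_element_alt a1 a2 := by
  intro n
  induction n using Nat.strong_induction_on with
  | _ n ih =>
    intro a1 a2 hn
    rw [get_max_element]
    by_cases hz : a1.length = 0 ∨ a2.length = 0
    · rw [if_pos hz]
      rcases hz with h | h
      · rw [List.length_eq_zero_iff] at h
        subst h
        exact (alt_eq_zero_of_disjoint [] a2 (by simp)).symm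
      · rw [List.length_eq_zero_iff] at h
        subst h
        exact (alt_eq_zero_of_disjoint a1 [] (by simp)).symm
    · rw [if_neg hz]
      push Not at hz
      have h1ne : a1 ≠ [] := fun h => hz.1 (by simp [h])
      have h2ne : a2 ≠ [] := fun h => hz.2 (by simp [h])
      obtain ⟨t1, ht1⟩ : ∃ m, PySem.List.max? a1 (fun x => x) = some m := by
        cases h : PySem.List.max? a1 (fun x => x) with
        | none => exact absurd ((PySem.List.max?_eq_none_iff _ _).mp h) h1ne
        | some m => exact ⟨m, rfl⟩
      obtain ⟨t2, ht2⟩ : ∃ m, PySem.List.max? a2 (fun x => x) = some m := by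
        cases h : PySem.List.max? a2 (fun x => x) with
        | none => exact absurd ((PySem.List.max?_eq_none_iff _ _).mp h) h2ne
        | some m => exact ⟨m, rfl⟩
      have ht1mem : t1 ∈ a1 := PySem.List.max?_mem ht1
      have ht2mem : t2 ∈ a2 := PySem.List.max?_mem ht2
      simp only [ht1, ht2, Option.getD_some]
      by_cases hgt : t1 > t2
      · rw [if_pos hgt, PySem.List.remove?_eq_some_erase a1 t1 ht1mem, Option.getD_some]
        have hlen : (a1.erase t1).length = a1.length - 1 := List.length_erase_of_mem ht1mem
        have hrec := ih ((a1.erase t1).length + a2.length)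
          (by have := List.length_pos_of_mem ht1mem; omega)
          (a1.erase t1) a2 rfl
        rw [hrec]
        exact alt_erase_left a1 a2 t1
          (fun h => absurd (PySem.List.max?_isMax ht2 t1 h) (by omega))
      · rw [if_neg hgt]
        by_cases hlt : t1 < t2
        · rw [if_pos hlt, PySem.List.remove?_eq_some_erase a2 t2 ht2mem, Option.getD_some]
          have hlen : (a2.erase t2).length = a2.length - 1 := List.length_erase_of_mem ht2mem
          have hrec := ih (a1.length + (a2.erase t2).length)
            (by have := List.length_pos_of_mem ht2mem; omega)
            a1 (a2.erase t2) rfl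
          rw [hrec]
          exact alt_erase_right a1 a2 t2
            (fun h => absurd (PySem.List.max?_isMax ht1 t2 h) (by omega))
        · rw [if_neg hlt]
          have heq : t1 = t2 := by omega
          exact (alt_eq_of_common a1 a2 t1 ht1mem (heq ▸ ht2mem)
            (fun x hx1 _ => PySem.List.max?_isMax ht1 x hx1)).symm

-- ===== VERDICT (by name: the statement is the Claim_ definition above) =====
theorem get_max_element_spec : Claim_equal_get_max_element := by
  intro a1 a2 _
  unfold Spec_get_max_element
  exact main_eq (a1.length + a2.length) a1 a2 rfl
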